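-- pv_equiv track=rewrite | github.com/XiaoZhou2024/ODHQA | tools/expression_calculator.py | remove_multiply_suffix
-- ===== SOURCE A (Python) =====
-- def remove_multiply_suffix(strings: str) -> str:
--     """
--     Detects and removes specific multiplication suffixes at the end of the expression string.
--
--     Args:
--         strings (str): The string to be processed.
--
--     Returns:
--         str: The processed string with designated suffixes removed.
--     """
--     strings = strings.replace(" ", "")
--     strings = [strings]
--     suffixes_to_remove = [
--         ",multiply(#0,100)", ",multiply(#1,100)", ",multiply(#2,100)",
--         ",multiply(#3,100)", ",multiply(#4,100)"
--     ]
--     processed_strings = []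
--     for string in strings:
--         for suffix in suffixes_to_remove:
--             if string.endswith(suffix):
--                 string = string[: -len(suffix)]
--                 break  # Stop at the first matching suffix
--         processed_strings.append(string)
--     return processed_strings[0]
-- ===== SOURCE B (Python) =====
-- def remove_multiply_suffix(strings: str) -> str:
--     s = strings.replace(" ", "")
--     if s.endswith(",100)") and len(s) >= 17 and s[-17:-6] == ",multiply(#" and s[-6] in "01234":
--         return s[:-17]
--     return s
-- ===== Notes on version B (the rewrite author's own statement) =====
-- stated objective: simpler
-- what changed: Replaces the loop over five literal suffixes (endswith each, slice, break) by a single structural test of the trailing 17 characters: fixed comma-multiply template with a digit class 0-4, stripping once if it matches.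
import Mathlib
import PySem

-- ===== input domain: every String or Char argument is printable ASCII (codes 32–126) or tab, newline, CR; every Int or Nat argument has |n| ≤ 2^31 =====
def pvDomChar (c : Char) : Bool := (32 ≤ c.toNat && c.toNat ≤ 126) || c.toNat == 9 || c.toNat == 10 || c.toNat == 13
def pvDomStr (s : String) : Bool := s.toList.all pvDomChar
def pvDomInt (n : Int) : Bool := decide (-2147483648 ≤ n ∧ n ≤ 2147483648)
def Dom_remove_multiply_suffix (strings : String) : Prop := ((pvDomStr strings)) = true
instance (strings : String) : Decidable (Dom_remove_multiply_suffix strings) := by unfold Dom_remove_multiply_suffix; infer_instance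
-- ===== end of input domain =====

-- B replaces A's loop over five literal suffixes by one structural test of the trailing
-- 17 characters (template + digit class 0-4); objective: simpler, same behaviour.

-- ===== PORT A =====
def pvSuffixes : List String :=
  [",multiply(#0,100)", ",multiply(#1,100)", ",multiply(#2,100)",
   ",multiply(#3,100)", ",multiply(#4,100)"]

-- 'for suffix in suffixes_to_remove: if string.endswith(suffix): string = string[:-len(suffix)]; break'
def pvStripLoop : List String → String → String
  | [], string => string
  | suffix :: rest, string =>
    if PySem.Str.endswith string suffix then
      PySem.Str.slice string none (some (-(PySem.Str.len suffix : Int)))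
    else pvStripLoop rest string

def remove_multiply_suffix (strings : String) : String :=
  let s := PySem.Str.replace strings " " ""
  let processed := [s].map (fun string => pvStripLoop pvSuffixes string)
  -- processed_strings[0]; the list is a singleton, so the index is always in range
  (PySem.List.pyGet? processed 0).getD ""

-- ===== PORT B =====
def remove_multiply_suffix_alt (strings : String) : String :=
  let s := PySem.Str.replace strings " " ""
  -- 's[-6] in "01234"': the index is in range because 'len(s) >= 17' was already checked
  if PySem.Str.endswith s ",100)" && decide (17 ≤ PySem.Str.len s)
      && (PySem.Str.slice s (some (-17)) (some (-6)) == ",multiply(#")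
      && ((PySem.Str.pyGet? s (-6)).any fun c => PySem.Chars.isIn [c] "01234".toList)
  then PySem.Str.slice s none (some (-17))
  else s

-- ===== PRECONDITION & SPEC =====
def Spec_remove_multiply_suffix (strings : String) (out : String) : Prop := out = remove_multiply_suffix_alt strings
instance (strings : String) (out : String) : Decidable (Spec_remove_multiply_suffix strings out) := by unfold Spec_remove_multiply_suffix; infer_instance

-- ===== CLAIM (what is proved, stated in full; the proofs are below) =====
def Claim_equal_remove_multiply_suffix : Prop := ∀ (strings : String), Dom_remove_multiply_suffix strings → Spec_remove_multiply_suffix strings (remove_multiply_suffix strings)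

-- ===== LEMMAS AND PROOFS =====

-- the shared string pieces, as char lists: pvSfx d = ",multiply(#" + d + ",100)"
def pvM : List Char := ",multiply(#".toList
def pvT : List Char := ",100)".toList
def pvSfx (d : Char) : List Char := pvM ++ d :: pvT

lemma pv_suffix_eq_drop {u l : List Char} (h : u <:+ l) : u = l.drop (l.length - u.length) := by
  obtain ⟨p, rfl⟩ := h
  have h2 : (p ++ u).length - u.length = p.length := by simp
  rw [h2, List.drop_left]

lemma pv_slice_17_6 (cs : List Char) (h : 17 ≤ cs.length) :
    PySem.List.slice cs (some (-17)) (some (-6)) = (cs.drop (cs.length - 17)).take 11 := by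
  have h1 : ¬ cs.length < 6 := by omega
  have h2 : ¬ cs.length < 17 := by omega
  rw [PySem.List.slice]
  simp only [PySem.List.clampIdx]
  rw [if_pos (by norm_num : (-6 : Int) < 0), if_pos (by norm_num : (-17 : Int) < 0),
      if_neg (by omega : ¬ ((cs.length : Int) + (-6 : Int)) < 0),
      if_neg (by omega : ¬ ((cs.length : Int) + (-17 : Int)) < 0)]
  have hA : ((cs.length : Int) + (-17 : Int)).toNat = cs.length - 17 := by omega
  have hB : ((cs.length : Int) + (-6 : Int)).toNat = cs.length - 6 := by omega
  have hC : cs.length - 6 - (cs.length - 17) = 11 := by omega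
  rw [hA, hB, hC]

-- each of B's four tests holds whenever cs ends with pvSfx d
lemma pv_forward (cs : List Char) (d : Char) (h : pvSfx d <:+ cs) :
    pvT <:+ cs ∧ 17 ≤ cs.length ∧
    PySem.List.slice cs (some (-17)) (some (-6)) = pvM ∧
    PySem.List.pyGet? cs (-6) = some d := by
  obtain ⟨p, rfl⟩ := h
  have hlen : (p ++ pvSfx d).length = p.length + 17 := by simp [pvSfx, pvM, pvT]
  have h17 : 17 ≤ (p ++ pvSfx d).length := by omega
  refine ⟨?_, h17, ?_, ?_⟩
  · exact (List.suffix_append (pvM ++ [d]) pvT).trans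
      (by rw [show pvSfx d = (pvM ++ [d]) ++ pvT by simp [pvSfx]]; exact List.suffix_append p _)
  · rw [pv_slice_17_6 _ h17, hlen]
    have h3 : p.length + 17 - 17 = p.length := by omega
    rw [h3, List.drop_left, pvSfx, show (11 : Nat) = pvM.length from by decide, List.take_left]
  · rw [PySem.List.pyGet?_neg_ofNat _ 6 (by omega) (by omega), hlen]
    have h6 : p.length + 17 - 6 = p.length + 11 := by omega
    rw [h6, List.getElem?_append_right (by omega)]
    have h11 : p.length + 11 - p.length = 11 := by omega
    rw [h11, pvSfx, List.getElem?_append_right (by decide),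
      show 11 - pvM.length = 0 from by decide]
    rfl

-- conversely, B's four tests force cs to end with pvSfx d
lemma pv_backward (cs : List Char) (d : Char)
    (h1 : pvT <:+ cs) (h2 : 17 ≤ cs.length)
    (h3 : PySem.List.slice cs (some (-17)) (some (-6)) = pvM)
    (h4 : PySem.List.pyGet? cs (-6) = some d) :
    pvSfx d <:+ cs := by
  have h5 : pvT = cs.drop (cs.length - 5) := by
    have h := pv_suffix_eq_drop h1
    rwa [show pvT.length = 5 from by decide] at h
  have hdlt : cs.length - 6 < cs.length := by omega
  have hd' : cs[cs.length - 6] = d := by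
    rw [PySem.List.pyGet?_neg_ofNat _ 6 (by omega) (by omega)] at h4
    rw [List.getElem?_eq_getElem hdlt] at h4
    exact Option.some_injective _ h4
  have hm : (cs.drop (cs.length - 17)).take 11 = pvM := by
    rw [← pv_slice_17_6 cs h2]; exact h3
  have hdrop : cs.drop (cs.length - 17) = pvSfx d := by
    have e1 : cs.drop (cs.length - 17) =
        (cs.drop (cs.length - 17)).take 11 ++ (cs.drop (cs.length - 17)).drop 11 :=
      (List.take_append_drop _ _).symm
    have e2 : (cs.drop (cs.length - 17)).drop 11 = cs.drop (cs.length - 6) := by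
      have hn : cs.length - 17 + 11 = cs.length - 6 := by omega
      rw [List.drop_drop, hn]
    have e3 : cs.drop (cs.length - 6) = d :: cs.drop (cs.length - 5) := by
      have hn : cs.length - 6 + 1 = cs.length - 5 := by omega
      rw [List.drop_eq_getElem_cons hdlt, hd', hn]
    rw [e1, hm, e2, e3, ← h5]
    rfl
  rw [← hdrop]
  exact List.drop_suffix _ _

-- B's Bool condition is true when s ends with pvSfx d
lemma pv_true_branch (s : String) (d : Char) (hd : d ∈ ['0', '1', '2', '3', '4'])
    (h : pvSfx d <:+ s.toList) :
    (PySem.Str.endswith s ",100)" && decide (17 ≤ PySem.Str.len s)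
      && (PySem.Str.slice s (some (-17)) (some (-6)) == ",multiply(#")
      && ((PySem.Str.pyGet? s (-6)).any fun c => PySem.Chars.isIn [c] "01234".toList)) = true := by
  obtain ⟨h1, h2, h3, h4⟩ := pv_forward _ _ h
  have b1 : PySem.Str.endswith s ",100)" = true := by
    rw [PySem.Str.endswith_eq]
    exact (PySem.Chars.endswith_iff _ _).mpr h1
  have b2 : decide (17 ≤ PySem.Str.len s) = true := by
    simp only [PySem.Str.len_eq, decide_eq_true_eq]
    exact_mod_cast h2
  have b3 : (PySem.Str.slice s (some (-17)) (some (-6)) == ",multiply(#") = true := by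
    rw [beq_iff_eq]
    apply String.toList_inj.mp
    rw [PySem.Str.toList_slice]
    simp only [PySem.Chars.slice_eq_listSlice]
    rw [h3]
    decide
  have b4 : ((PySem.Str.pyGet? s (-6)).any fun c => PySem.Chars.isIn [c] "01234".toList) = true := by
    have hg : PySem.Str.pyGet? s (-6) = some d := by
      simp only [PySem.Str.pyGet?_eq, PySem.Chars.pyGet?_eq_listPyGet?]
      exact h4
    rw [hg, Option.any_some]
    fin_cases hd <;> decide
  rw [b1, b2, b3, b4]
  rfl

-- conversely, B's condition yields a matched suffix
lemma pv_cond_elim (s : String)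
    (hc : (PySem.Str.endswith s ",100)" && decide (17 ≤ PySem.Str.len s)
      && (PySem.Str.slice s (some (-17)) (some (-6)) == ",multiply(#")
      && ((PySem.Str.pyGet? s (-6)).any fun c => PySem.Chars.isIn [c] "01234".toList)) = true) :
    ∃ d, d ∈ ['0', '1', '2', '3', '4'] ∧ pvSfx d <:+ s.toList := by
  simp only [Bool.and_eq_true] at hc
  obtain ⟨⟨⟨b1, b2⟩, b3⟩, b4⟩ := hc
  have h1 : pvT <:+ s.toList := by
    rw [PySem.Str.endswith_eq] at b1
    exact (PySem.Chars.endswith_iff _ _).mp b1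
  have h2 : 17 ≤ s.toList.length := by
    simp only [PySem.Str.len_eq, decide_eq_true_eq] at b2
    exact_mod_cast b2
  have h3 : PySem.List.slice s.toList (some (-17)) (some (-6)) = pvM := by
    rw [beq_iff_eq] at b3
    have := congrArg String.toList b3
    rw [PySem.Str.toList_slice] at this
    simp only [PySem.Chars.slice_eq_listSlice] at this
    rw [this]
    decide
  obtain ⟨d, hg, hdig⟩ : ∃ d, PySem.Str.pyGet? s (-6) = some d ∧
      PySem.Chars.isIn [d] "01234".toList = true := by
    cases hgv : PySem.Str.pyGet? s (-6) with
    | none => rw [hgv] at b4; simp at b4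
    | some d => rw [hgv, Option.any_some] at b4; exact ⟨d, rfl, b4⟩
  have h4 : PySem.List.pyGet? s.toList (-6) = some d := by
    simp only [PySem.Str.pyGet?_eq, PySem.Chars.pyGet?_eq_listPyGet?] at hg
    exact hg
  have hmem : d ∈ ['0', '1', '2', '3', '4'] := by
    have hinf := (PySem.Chars.isIn_iff_infix _ _).mp hdig
    have hsub := List.singleton_sublist.mp hinf.sublist
    rw [show ("01234" : String).toList = ['0', '1', '2', '3', '4'] from by decide] at hsub
    exact hsub
  exact ⟨d, hmem, pv_backward _ _ h1 h2 h3 h4⟩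

-- pvSfx at a literal digit, back to the Str.endswith Bool A tests
lemma pv_endswith_of_sfx (s : String) (d : Char) (suf : String)
    (he : suf.toList = pvSfx d) (h : pvSfx d <:+ s.toList) :
    PySem.Str.endswith s suf = true := by
  rw [PySem.Str.endswith_eq, he]
  exact (PySem.Chars.endswith_iff _ _).mpr h

-- ===== VERDICT (by name: the statement is the Claim_ definition above) =====
theorem remove_multiply_suffix_spec : Claim_equal_remove_multiply_suffix := by
  intro strings _
  unfold Spec_remove_multiply_suffix remove_multiply_suffix remove_multiply_suffix_alt
  simp only [List.map, PySem.List.pyGet?_zero_cons, Option.getD]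
  generalize PySem.Str.replace strings " " "" = s
  simp only [pvSuffixes, pvStripLoop]
  rw [show (-(PySem.Str.len ",multiply(#0,100)" : Int)) = -17 from by decide,
      show (-(PySem.Str.len ",multiply(#1,100)" : Int)) = -17 from by decide,
      show (-(PySem.Str.len ",multiply(#2,100)" : Int)) = -17 from by decide,
      show (-(PySem.Str.len ",multiply(#3,100)" : Int)) = -17 from by decide,
      show (-(PySem.Str.len ",multiply(#4,100)" : Int)) = -17 from by decide]
  by_cases e0 : PySem.Str.endswith s ",multiply(#0,100)" = true
  · have h0 : pvSfx '0' <:+ s.toList := by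
      rw [PySem.Str.endswith_eq, show (",multiply(#0,100)" : String).toList = pvSfx '0' from by decide] at e0
      exact (PySem.Chars.endswith_iff _ _).mp e0
    rw [if_pos e0, if_pos (pv_true_branch s '0' (by decide) h0)]
  rw [if_neg e0]
  by_cases e1 : PySem.Str.endswith s ",multiply(#1,100)" = true
  · have h1 : pvSfx '1' <:+ s.toList := by
      rw [PySem.Str.endswith_eq, show (",multiply(#1,100)" : String).toList = pvSfx '1' from by decide] at e1
      exact (PySem.Chars.endswith_iff _ _).mp e1
    rw [if_pos e1, if_pos (pv_true_branch s '1' (by decide) h1)]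
  rw [if_neg e1]
  by_cases e2 : PySem.Str.endswith s ",multiply(#2,100)" = true
  · have h2 : pvSfx '2' <:+ s.toList := by
      rw [PySem.Str.endswith_eq, show (",multiply(#2,100)" : String).toList = pvSfx '2' from by decide] at e2
      exact (PySem.Chars.endswith_iff _ _).mp e2
    rw [if_pos e2, if_pos (pv_true_branch s '2' (by decide) h2)]
  rw [if_neg e2]
  by_cases e3 : PySem.Str.endswith s ",multiply(#3,100)" = true
  · have h3 : pvSfx '3' <:+ s.toList := by
      rw [PySem.Str.endswith_eq, show (",multiply(#3,100)" : String).toList = pvSfx '3' from by decide] at e3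
      exact (PySem.Chars.endswith_iff _ _).mp e3
    rw [if_pos e3, if_pos (pv_true_branch s '3' (by decide) h3)]
  rw [if_neg e3]
  by_cases e4 : PySem.Str.endswith s ",multiply(#4,100)" = true
  · have h4 : pvSfx '4' <:+ s.toList := by
      rw [PySem.Str.endswith_eq, show (",multiply(#4,100)" : String).toList = pvSfx '4' from by decide] at e4
      exact (PySem.Chars.endswith_iff _ _).mp e4
    rw [if_pos e4, if_pos (pv_true_branch s '4' (by decide) h4)]
  rw [if_neg e4]
  by_cases hc : (PySem.Str.endswith s ",100)" && decide (17 ≤ PySem.Str.len s)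
      && (PySem.Str.slice s (some (-17)) (some (-6)) == ",multiply(#")
      && ((PySem.Str.pyGet? s (-6)).any fun c => PySem.Chars.isIn [c] "01234".toList)) = true
  · exfalso
    obtain ⟨d, hd, hsfx⟩ := pv_cond_elim s hc
    simp only [List.mem_cons, List.not_mem_nil, or_false] at hd
    rcases hd with rfl | rfl | rfl | rfl | rfl
    · exact e0 (pv_endswith_of_sfx s '0' ",multiply(#0,100)" (by decide) hsfx)
    · exact e1 (pv_endswith_of_sfx s '1' ",multiply(#1,100)" (by decide) hsfx)
    · exact e2 (pv_endswith_of_sfx s '2' ",multiply(#2,100)" (by decide) hsfx)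
    · exact e3 (pv_endswith_of_sfx s '3' ",multiply(#3,100)" (by decide) hsfx)
    · exact e4 (pv_endswith_of_sfx s '4' ",multiply(#4,100)" (by decide) hsfx)
  rw [if_neg hc]
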